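-- pv_equiv track=rewrite | github.com/tbocina/rosalind-solutions | BA2B.py | kmerindicies
-- ===== SOURCE A (Python) =====
-- def kmer(text, i ,k):
--     #substring of text from i-th position for the next k letters
--     return text[i:(i+k)]
--
-- def kmerindicies(text,k):
--     #find indicies of all k-mers in text
--     D=dict()
--     for i in range(0, len(text)-k+1):
--         tmp=kmer(text,i,k)
--         try:
--             D[tmp].append(i)
--         except KeyError:
--             D[tmp]=[i]
--     return D
-- ===== SOURCE B (Python) =====
-- def kmerindicies(text, k):
--     # materialize all k-mers, dedup in first-occurrence order, then gather
--     # each kmer's start indices by a filtered enumerate scan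
--     kmers = [text[i:i + k] for i in range(0, len(text) - k + 1)]
--     return {km: [i for i, x in enumerate(kmers) if x == km]
--             for km in dict.fromkeys(kmers)}
-- ===== Notes on version B (the rewrite author's own statement) =====
-- stated objective: alternative
-- what changed: Replaces the single-pass try/except dict update with a materialize-dedup-group pipeline: list all k-mers, dedup them in first-occurrence order with dict.fromkeys, and build each key's index list by a filtered enumerate scan (dict comprehension).
import Mathlib
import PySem

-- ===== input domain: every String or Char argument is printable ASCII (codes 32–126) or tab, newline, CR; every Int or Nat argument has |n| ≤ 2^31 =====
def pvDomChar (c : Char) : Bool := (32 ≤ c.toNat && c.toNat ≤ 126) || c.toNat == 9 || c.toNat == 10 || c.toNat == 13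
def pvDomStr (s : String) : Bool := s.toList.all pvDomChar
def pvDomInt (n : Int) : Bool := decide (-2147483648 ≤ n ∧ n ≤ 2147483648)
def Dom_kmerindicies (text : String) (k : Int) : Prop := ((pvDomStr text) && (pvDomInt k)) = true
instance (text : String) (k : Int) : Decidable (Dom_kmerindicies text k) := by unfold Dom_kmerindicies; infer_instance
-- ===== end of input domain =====

-- B replaces A's single-pass try/except dict update by a materialize–dedup–group
-- pipeline (list all k-mers, dedup first occurrences, gather indices by a filtered
-- enumerate scan); alternative decomposition, not claimed faster.

-- ===== PORT A =====
def kmer (text : String) (i k : Int) : String :=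
  PySem.Str.slice text (some i) (some (i + k))

def kmerindicies (text : String) (k : Int) : List (String × List Int) :=
  ((PySem.List.pyRange 0 (PySem.Str.len text - k + 1) 1).foldl
    (fun D i =>
      let tmp := kmer text i k
      match D.get? tmp with
      | some l => D.insert tmp (l ++ [i])   -- D[tmp].append(i): in-place, key position kept
      | none   => D.insert tmp [i])         -- KeyError branch: D[tmp] = [i]
    PySem.Dict.empty).items

-- ===== PORT B =====
def kmerindicies_alt (text : String) (k : Int) : List (String × List Int) :=
  let kmers := (PySem.List.pyRange 0 (PySem.Str.len text - k + 1) 1).map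
    (fun i => PySem.Str.slice text (some i) (some (i + k)))
  (PySem.List.dedup kmers).map
    (fun km => (km, (PySem.List.enumerate kmers 0).filterMap
        (fun p => if p.2 = km then some p.1 else none)))

-- ===== PRECONDITION & SPEC =====
def Spec_kmerindicies (text : String) (k : Int) (out : List (String × List Int)) : Prop := out = kmerindicies_alt text k
instance (text : String) (k : Int) (out : List (String × List Int)) : Decidable (Spec_kmerindicies text k out) := by unfold Spec_kmerindicies; infer_instance

-- ===== CLAIM (what is proved, stated in full; the proofs are below) =====
def Claim_equal_kmerindicies : Prop := ∀ (text : String) (k : Int), Dom_kmerindicies text k → Spec_kmerindicies text k (kmerindicies text k)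

-- ===== LEMMAS AND PROOFS =====

-- enumerate of a mapped range lists the range elements as the indices
theorem enum_map_pyRange (m : Int) (f : Int → String) :
    PySem.List.enumerate ((PySem.List.pyRange 0 m 1).map f) 0
      = (PySem.List.pyRange 0 m 1).map (fun i => (i, f i)) := by
  rw [PySem.List.pyRange_one]
  induction (m - 0).toNat with
  | zero => rfl
  | succ n ih =>
      rw [List.range_succ, List.map_append, List.map_append,
          PySem.List.enumerate_append, ih]
      simp [PySem.List.enumerate_cons]

-- project the values out of a filtered (key, index) pair list
theorem filter_pairs_eq_filterMap (is : List Int) (f : Int → String) (km : String) :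
    ((is.map (fun i => (f i, i))).filter (fun p => p.1 == km)).map (·.2)
      = is.filterMap (fun i => if f i = km then some i else none) := by
  induction is with
  | nil => rfl
  | cons a t ih => by_cases h : f a = km <;> simp [h, ih]

-- A's grouping loop, characterised: items = dedup'd keys paired with their index lists
theorem dict_items_core (is : List Int) (f : Int → String) :
    ((is.foldl (fun D i =>
        let tmp := f i
        match D.get? tmp with
        | some l => D.insert tmp (l ++ [i])
        | none   => D.insert tmp [i]) PySem.Dict.empty)).items
    = (PySem.List.dedup (is.map f)).map
        (fun km => (km, is.filterMap (fun i => if f i = km then some i else none))) := by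
  have hstep : (is.foldl (fun D i =>
        let tmp := f i
        match D.get? tmp with
        | some l => D.insert tmp (l ++ [i])
        | none   => D.insert tmp [i]) PySem.Dict.empty)
      = (is.map (fun i => (f i, i))).foldl (fun d p => d.modify p.1 [] (· ++ [p.2])) PySem.Dict.empty := by
    rw [List.foldl_map]
    congr 1; funext D i
    cases h : D.get? (f i) <;> simp [PySem.Dict.modify, PySem.Dict.getD_eq_get?_getD, h]
  rw [hstep]
  set l := is.map (fun i => (f i, i)) with hl
  set d := l.foldl (fun d p => d.modify p.1 [] (· ++ [p.2])) PySem.Dict.empty with hd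
  have hnd : d.keys.Nodup := by
    rw [hd]
    exact PySem.Dict.nodup_keys_foldl_modify_key l (·.1) [] (fun d p => (· ++ [p.2])) _ PySem.Dict.nodup_keys_empty
  have hkeys : d.keys = PySem.Set.ofList (is.map f) := by
    rw [hd, PySem.Dict.keys_foldl_modify_key]
    simp [PySem.Dict.keys_empty, hl, List.map_map, Function.comp_def]
    rfl
  rw [PySem.Dict.items_eq_map_keys d hnd [], hkeys, PySem.List.dedup_eq_ofList]
  apply List.map_congr_left
  intro km hkm
  have hg : d.getD km [] = (l.filter (fun p => p.1 == km)).map (·.2) := by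
    rw [hd, PySem.Dict.getD_foldl_modify_append, PySem.Dict.getD_empty]
    simp
  rw [hg, hl, filter_pairs_eq_filterMap]

-- ===== VERDICT (by name: the statement is the Claim_ definition above) =====
theorem kmerindicies_spec : Claim_equal_kmerindicies := by
  intro text k _
  show kmerindicies text k = kmerindicies_alt text k
  have hA : kmerindicies text k
      = (PySem.List.dedup ((PySem.List.pyRange 0 (PySem.Str.len text - k + 1) 1).map
          (fun i => PySem.Str.slice text (some i) (some (i + k))))).map
          (fun km => (km, (PySem.List.pyRange 0 (PySem.Str.len text - k + 1) 1).filterMap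
              (fun i => if PySem.Str.slice text (some i) (some (i + k)) = km then some i else none))) :=
    dict_items_core (PySem.List.pyRange 0 (PySem.Str.len text - k + 1) 1)
      (fun i => PySem.Str.slice text (some i) (some (i + k)))
  rw [hA]
  unfold kmerindicies_alt
  simp only [enum_map_pyRange, List.filterMap_map, Function.comp_def]
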